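-- pv_equiv track=rewrite | github.com/carlodenardin-units/Italian-lyrics-retrieval-system | src/modules/query.py | __compute_positional_intersect
-- ===== SOURCE A (Python) =====
-- def __compute_positional_intersect(p1, p2, k):
-- 	"""
-- 		This function append to the results list the documents that contains
-- 		the 2 tokens with a distance of k.
-- 	"""
-- 	results = []
-- 	for doc in p1:
--
-- 		if doc in p2:
--
-- 			list_1 = p1[doc]
-- 			list_2 = p2[doc]
--
-- 			for position_1 in list_1:
-- 				for position_2 in list_2:
-- 					if position_2 - position_1 == k:
-- 						results.append(doc)
-- 						break
--
-- 	return results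
-- ===== SOURCE B (Python) =====
-- def __compute_positional_intersect(p1, p2, k):
--     """Sort-then-merge re-implementation: for each shared doc, sort the first
--     position list and the deduplicated second list, then sweep one pointer
--     across the second list while scanning the first, counting matches."""
--     results = []
--     for doc in p1:
--         if doc in p2:
--             s1 = sorted(p1[doc])
--             s2 = sorted(set(p2[doc]))
--             j = 0
--             count = 0
--             for a in s1:
--                 t = a + k
--                 while j < len(s2) and s2[j] < t:
--                     j += 1
--                 if j < len(s2) and s2[j] == t:
--                     count += 1
--             results.extend([doc] * count)
--     return results
-- ===== Notes on version B (the rewrite author's own statement) =====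
-- stated objective: alternative
-- what changed: Replaces the nested per-position scan of list_2 with sorting both lists (list_2 deduplicated) and a single advancing two-pointer merge pass that counts matching positions per document.
import Mathlib
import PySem

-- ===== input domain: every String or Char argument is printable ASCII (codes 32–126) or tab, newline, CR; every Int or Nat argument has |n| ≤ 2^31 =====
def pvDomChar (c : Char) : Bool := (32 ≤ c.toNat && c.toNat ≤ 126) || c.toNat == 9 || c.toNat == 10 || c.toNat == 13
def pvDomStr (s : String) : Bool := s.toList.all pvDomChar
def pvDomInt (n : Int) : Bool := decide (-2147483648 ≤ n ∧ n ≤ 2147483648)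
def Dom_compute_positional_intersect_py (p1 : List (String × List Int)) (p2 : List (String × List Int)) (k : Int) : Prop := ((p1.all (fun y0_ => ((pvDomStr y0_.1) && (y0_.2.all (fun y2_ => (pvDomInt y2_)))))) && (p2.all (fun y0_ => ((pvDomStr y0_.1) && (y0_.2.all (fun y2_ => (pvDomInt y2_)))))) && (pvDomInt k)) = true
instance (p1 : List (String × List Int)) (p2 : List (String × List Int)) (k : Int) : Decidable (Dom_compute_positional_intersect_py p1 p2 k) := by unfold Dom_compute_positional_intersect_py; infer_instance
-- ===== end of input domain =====

-- B replaces A's nested pairwise scan per document by a sort-then-merge sweep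
-- (sorted positions + one advancing pointer over the deduplicated second list).

-- ===== PORT A =====
-- 'for doc in p1' iterates the dict's keys in insertion order; the items list pairs
-- each key with its value, so 'list_1 = p1[doc]' is item.2. 'if doc in p2: list_2 = p2[doc]'
-- is the match on d2.get? (contains ↔ get? is some). The inner 'for … break' appends doc
-- once as soon as some position_2 with position_2 - position_1 == k exists (List.any).
def compute_positional_intersect_py (p1 : List (String × List Int)) (p2 : List (String × List Int)) (k : Int) : List String :=
  let d2 := PySem.Dict.ofList p2
  (PySem.Dict.ofList p1).items.foldl (fun results item =>
    match d2.get? item.1 with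
    | some list_2 =>
        item.2.foldl (fun results position_1 =>
          if list_2.any (fun position_2 => position_2 - position_1 == k)
          then results ++ [item.1] else results) results
    | none => results) []

-- ===== PORT B =====
-- 'while j < len(s2) and s2[j] < t: j += 1'
def pvAdvance (s2 : List Int) (t : Int) (j : Nat) : Nat :=
  if h : j < s2.length then
    if s2[j] < t then pvAdvance s2 t (j + 1) else j
  else j
termination_by s2.length - j

-- the 'for a in s1' loop carrying (j, count)
def pvMergeCount (s2 : List Int) (k : Int) (s1 : List Int) : Nat :=
  (s1.foldl (fun jc a =>
    let j := pvAdvance s2 (a + k) jc.1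
    if h : j < s2.length then
      if s2[j] = a + k then (j, jc.2 + 1) else (j, jc.2)
    else (j, jc.2)) ((0 : Nat), (0 : Nat))).2

def compute_positional_intersect_py_alt (p1 : List (String × List Int)) (p2 : List (String × List Int)) (k : Int) : List String :=
  let d2 := PySem.Dict.ofList p2
  (PySem.Dict.ofList p1).items.foldl (fun results item =>
    match d2.get? item.1 with
    | some list_2 =>
        let s1 := PySem.List.sorted item.2 (fun x => x) false
        let s2 := PySem.List.sorted (PySem.Set.ofList list_2) (fun x => x) false
        results ++ List.replicate (pvMergeCount s2 k s1) item.1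
    | none => results) []

-- ===== PRECONDITION & SPEC =====
def Spec_compute_positional_intersect_py (p1 : List (String × List Int)) (p2 : List (String × List Int)) (k : Int) (out : List String) : Prop := out = compute_positional_intersect_py_alt p1 p2 k
instance (p1 : List (String × List Int)) (p2 : List (String × List Int)) (k : Int) (out : List String) : Decidable (Spec_compute_positional_intersect_py p1 p2 k out) := by unfold Spec_compute_positional_intersect_py; infer_instance

-- ===== CLAIM (what is proved, stated in full; the proofs are below) =====
def Claim_equal_compute_positional_intersect_py : Prop := ∀ (p1 : List (String × List Int)) (p2 : List (String × List Int)) (k : Int), Dom_compute_positional_intersect_py p1 p2 k → Spec_compute_positional_intersect_py p1 p2 k (compute_positional_intersect_py p1 p2 k)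

-- ===== LEMMAS AND PROOFS =====

theorem pvAdvance_le (s2 : List Int) (t : Int) (j : Nat) : j ≤ pvAdvance s2 t j := by
  unfold pvAdvance
  split
  · split
    · exact le_trans (Nat.le_succ j) (pvAdvance_le s2 t (j + 1))
    · exact le_refl j
  · exact le_refl j
termination_by s2.length - j

theorem pvAdvance_stop (s2 : List Int) (t : Int) (j : Nat)
    (h : pvAdvance s2 t j < s2.length) : t ≤ s2.getD (pvAdvance s2 t j) 0 := by
  by_cases h1 : j < s2.length
  · by_cases h2 : s2[j] < t
    · have he : pvAdvance s2 t j = pvAdvance s2 t (j + 1) := by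
        conv_lhs => rw [pvAdvance]
        simp [h1, h2]
      rw [he] at h ⊢
      exact pvAdvance_stop s2 t (j + 1) h
    · have he : pvAdvance s2 t j = j := by
        conv_lhs => rw [pvAdvance]
        simp [h1, h2]
      rw [he, List.getD_eq_getElem s2 0 h1]
      omega
  · have he : pvAdvance s2 t j = j := by
      conv_lhs => rw [pvAdvance]
      simp [h1]
    rw [he] at h
    omega
termination_by s2.length - j

theorem pvAdvance_all (s2 : List Int) (t : Int) (j : Nat)
    (hj : ∀ i, i < j → i < s2.length → s2.getD i 0 < t) :
    ∀ i, i < pvAdvance s2 t j → i < s2.length → s2.getD i 0 < t := by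
  by_cases h1 : j < s2.length
  · by_cases h2 : s2[j] < t
    · have he : pvAdvance s2 t j = pvAdvance s2 t (j + 1) := by
        conv_lhs => rw [pvAdvance]
        simp [h1, h2]
      rw [he]
      refine pvAdvance_all s2 t (j + 1) ?_
      intro i hi hil
      rcases Nat.lt_succ_iff_lt_or_eq.mp hi with h' | h'
      · exact hj i h' hil
      · subst h'
        rw [List.getD_eq_getElem s2 0 hil]
        exact h2
    · have he : pvAdvance s2 t j = j := by
        conv_lhs => rw [pvAdvance]
        simp [h1, h2]
      rw [he]
      exact hj
  · have he : pvAdvance s2 t j = j := by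
      conv_lhs => rw [pvAdvance]
      simp [h1]
    rw [he]
    exact hj
termination_by s2.length - j

-- whether the pointer test fires is exactly membership of t in the strictly sorted s2
theorem pvAdvance_mem_iff (s2 : List Int) (hs2 : s2.Pairwise (· < ·)) (t : Int) (j : Nat)
    (hj : ∀ i, i < j → i < s2.length → s2.getD i 0 < t) :
    (pvAdvance s2 t j < s2.length ∧ s2.getD (pvAdvance s2 t j) 0 = t) ↔ t ∈ s2 := by
  constructor
  · rintro ⟨h, he⟩
    rw [List.getD_eq_getElem s2 0 h] at he
    exact he ▸ List.getElem_mem h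
  · intro hm
    obtain ⟨m, hmlen, hme⟩ := List.getElem_of_mem hm
    have hall := pvAdvance_all s2 t j hj
    have hmge : ¬ m < pvAdvance s2 t j := by
      intro hlt
      have := hall m hlt hmlen
      rw [List.getD_eq_getElem s2 0 hmlen] at this
      omega
    have hle : pvAdvance s2 t j ≤ m := Nat.not_lt.mp hmge
    have hlen : pvAdvance s2 t j < s2.length := Nat.lt_of_le_of_lt hle hmlen
    refine ⟨hlen, ?_⟩
    have hstop := pvAdvance_stop s2 t j hlen
    rw [List.getD_eq_getElem s2 0 hlen] at hstop ⊢
    rcases Nat.lt_or_ge (pvAdvance s2 t j) m with hlt | hge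
    · have := List.pairwise_iff_getElem.mp hs2 _ _ hlen hmlen hlt
      omega
    · have : m = pvAdvance s2 t j := Nat.le_antisymm hge hle
      subst this
      exact hme

theorem pvMergeCount_loop (s2 : List Int) (hs2 : s2.Pairwise (· < ·)) (k : Int) :
    ∀ (s1 : List Int) (j c : Nat), s1.Pairwise (· ≤ ·) →
    (∀ i, i < j → i < s2.length → ∀ a ∈ s1, s2.getD i 0 < a + k) →
    (s1.foldl (fun jc a =>
      let j := pvAdvance s2 (a + k) jc.1
      if h : j < s2.length then
        if s2[j] = a + k then (j, jc.2 + 1) else (j, jc.2)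
      else (j, jc.2)) (j, c)).2 = c + s1.countP (fun a => decide (a + k ∈ s2))
  | [], j, c, _, _ => by simp
  | a :: rest, j, c, hsorted, hinv => by
    have hja : ∀ i, i < j → i < s2.length → s2.getD i 0 < a + k := fun i h1 h2 =>
      hinv i h1 h2 a List.mem_cons_self
    have hall := pvAdvance_all s2 (a + k) j hja
    have hmem := pvAdvance_mem_iff s2 hs2 (a + k) j hja
    have hinv' : ∀ i, i < pvAdvance s2 (a + k) j → i < s2.length →
        ∀ b ∈ rest, s2.getD i 0 < b + k := by
      intro i h1 h2 b hb
      have hab : a ≤ b := (List.pairwise_cons.mp hsorted).1 b hb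
      have := hall i h1 h2
      omega
    have hrest := pvMergeCount_loop s2 hs2 k rest (pvAdvance s2 (a + k) j)
    rw [List.foldl_cons]
    simp only []
    split
    · next h =>
      split
      · next he =>
        rw [hrest _ (List.pairwise_cons.mp hsorted).2 hinv']
        have hm : a + k ∈ s2 := hmem.mp ⟨h, by rw [List.getD_eq_getElem s2 0 h]; exact he⟩
        simp [hm]
        omega
      · next he =>
        rw [hrest _ (List.pairwise_cons.mp hsorted).2 hinv']
        have hm : ¬ a + k ∈ s2 := fun hm => by
          have := (hmem.mpr hm).2
          rw [List.getD_eq_getElem s2 0 (hmem.mpr hm).1] at this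
          exact he this
        simp [hm]
    · next h =>
      rw [hrest _ (List.pairwise_cons.mp hsorted).2 hinv']
      have hm : ¬ a + k ∈ s2 := fun hm => h (hmem.mpr hm).1
      simp [hm]

theorem pvMergeCount_eq (s2 : List Int) (hs2 : s2.Pairwise (· < ·)) (k : Int)
    (s1 : List Int) (hs1 : s1.Pairwise (· ≤ ·)) :
    pvMergeCount s2 k s1 = s1.countP (fun a => decide (a + k ∈ s2)) := by
  unfold pvMergeCount
  rw [pvMergeCount_loop s2 hs2 k s1 0 0 hs1 (by omega)]
  exact Nat.zero_add _

-- per-document agreement of the two inner computations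
theorem pv_inner_eq (k : Int) (doc : String) (list_1 list_2 : List Int) (acc : List String) :
    list_1.foldl (fun results position_1 =>
      if list_2.any (fun position_2 => position_2 - position_1 == k)
      then results ++ [doc] else results) acc
    = acc ++ List.replicate (pvMergeCount
        (PySem.List.sorted (PySem.Set.ofList list_2) (fun x => x) false) k
        (PySem.List.sorted list_1 (fun x => x) false)) doc := by
  rw [PySem.List.foldl_append_if
    (fun position_1 => list_2.any (fun position_2 => position_2 - position_1 == k))
    (fun _ => doc) list_1 acc]
  rw [List.map_const', ← List.countP_eq_length_filter]
  congr 1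
  set s2 := PySem.List.sorted (PySem.Set.ofList list_2) (fun x => x) false with hs2def
  have hperm2 : s2.Perm (PySem.Set.ofList list_2) := PySem.List.sorted_perm _ _ _
  have hnd2 : s2.Nodup := hperm2.nodup_iff.mpr (PySem.Set.nodup_ofList list_2)
  have hs2le : s2.Pairwise (· ≤ ·) := by
    simpa using PySem.List.sorted_pairwise (PySem.Set.ofList list_2) (fun x => x) (κ := Int)
  have hs2lt : s2.Pairwise (· < ·) :=
    (hs2le.and hnd2).imp (fun h => lt_of_le_of_ne h.1 h.2)
  have hs1le : (PySem.List.sorted list_1 (fun x => x) false).Pairwise (· ≤ ·) := by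
    simpa using PySem.List.sorted_pairwise list_1 (fun x => x) (κ := Int)
  rw [pvMergeCount_eq s2 hs2lt k _ hs1le]
  rw [(PySem.List.sorted_perm list_1 (fun x => x) false).countP_eq]
  congr 1
  apply List.countP_congr
  intro a _
  have hmem : (a + k ∈ s2) ↔ a + k ∈ list_2 := by
    rw [hperm2.mem_iff, PySem.Set.mem_ofList]
  simp only [List.any_eq_true, beq_iff_eq, decide_eq_true_eq, hmem]
  constructor
  · rintro ⟨b, hb, he⟩
    rw [show a + k = b by omega]
    exact hb
  · intro h
    exact ⟨a + k, h, by ring⟩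

-- ===== VERDICT (by name: the statement is the Claim_ definition above) =====
theorem compute_positional_intersect_py_spec : Claim_equal_compute_positional_intersect_py := by
  intro p1 p2 k _
  unfold Spec_compute_positional_intersect_py
  unfold compute_positional_intersect_py compute_positional_intersect_py_alt
  apply PySem.List.foldl_congr_mem
  intro acc item _
  cases h : (PySem.Dict.ofList p2).get? item.1 with
  | none => rfl
  | some list_2 => exact pv_inner_eq k item.1 item.2 list_2 acc
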